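-- pv_equiv track=rewrite | github.com/serendipitygen/private-devbot | file_path_converter.py | filename_to_path
-- ===== SOURCE A (Python) =====
-- char_mapping = {
--     '\\': '[[BACKSLASH]]',
--     '/': '[[SLASH]]',
--     ':': '[[COLON]]',
--     '*': '[[ASTERISK]]',
--     '?': '[[QUESTION]]',
--     '"': '[[QUOTE]]',
--     '<': '[[LESS]]',
--     '>': '[[GREATER]]',
--     '|': '[[PIPE]]',
--     ' ': '[[SPACE]]',
--     '.': '[[DOT]]',
--     ',': '[[COMMA]]',
--     ';': '[[SEMICOLON]]',
--     '=': '[[EQUAL]]',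
--     '(': '[[LPAREN]]',
--     ')': '[[RPAREN]]',
--     # '[': '[[LBRACKET]]',
--     # ']': '[[RBRACKET]]',
--     '{': '[[LBRACE]]',
--     '}': '[[RBRACE]]',
--     '&': '[[AMPERSAND]]',
--     '^': '[[CARET]]',
--     '%': '[[PERCENT]]',
--     '$': '[[DOLLAR]]',
--     '#': '[[HASH]]',
--     '@': '[[AT]]',
--     '!': '[[EXCLAMATION]]',
--     '`': '[[BACKTICK]]',
--     '~': '[[TILDE]]',
--     '+': '[[PLUS]]',
--     #'-': '[[MINUS]]',
--     #'_': '[[UNDERSCORE]]',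
--     "'": '[[SINGLEQUOTE]]'
-- }
--
-- drive_mapping = {
--     'C:': '[[DRIVE_C]]',
--     'D:': '[[DRIVE_D]]',
--     'E:': '[[DRIVE_E]]',
--     'F:': '[[DRIVE_F]]'
-- }
--
-- def filename_to_path(filename):
--     # 드라이브 문자 복원
--     for drive, replacement in drive_mapping.items():
--         if filename.startswith(replacement):
--             filename = filename.replace(replacement, drive, 1)
--             break
--
--     # [[PATH]]를 경로 구분자로 복원
--     filename = filename.replace('[[PATH]]', '\\')
--
--     # 나머지 특수 문자 복원
--     for char, replacement in char_mapping.items():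
--         filename = filename.replace(replacement, char)
--
--     return filename
-- ===== SOURCE B (Python) =====
-- _rev = {
--     '[[PATH]]': '\\',
--     '[[BACKSLASH]]': '\\', '[[SLASH]]': '/', '[[COLON]]': ':', '[[ASTERISK]]': '*',
--     '[[QUESTION]]': '?', '[[QUOTE]]': '"', '[[LESS]]': '<', '[[GREATER]]': '>',
--     '[[PIPE]]': '|', '[[SPACE]]': ' ', '[[DOT]]': '.', '[[COMMA]]': ',',
--     '[[SEMICOLON]]': ';', '[[EQUAL]]': '=', '[[LPAREN]]': '(', '[[RPAREN]]': ')',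
--     '[[LBRACE]]': '{', '[[RBRACE]]': '}', '[[AMPERSAND]]': '&', '[[CARET]]': '^',
--     '[[PERCENT]]': '%', '[[DOLLAR]]': '$', '[[HASH]]': '#', '[[AT]]': '@',
--     '[[EXCLAMATION]]': '!', '[[BACKTICK]]': '`', '[[TILDE]]': '~', '[[PLUS]]': '+',
--     '[[SINGLEQUOTE]]': "'",
-- }
--
-- _drive_rev = {
--     '[[DRIVE_C]]': 'C:', '[[DRIVE_D]]': 'D:',
--     '[[DRIVE_E]]': 'E:', '[[DRIVE_F]]': 'F:',
-- }
--
-- def filename_to_path(filename):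
--     # drive tokens all have length 11: restore by one slice lookup
--     d = _drive_rev.get(filename[:11])
--     if d is not None:
--         filename = d + filename[11:]
--     # single left-to-right scan: at each '[[' read up to the next ']]' and
--     # look the bracketed token up in the reverse table
--     out = []
--     i, n = 0, len(filename)
--     while i < n:
--         if filename.startswith('[[', i):
--             j = filename.find(']]', i)
--             if j != -1:
--                 rep = _rev.get(filename[i:j + 2])
--                 if rep is not None:
--                     out.append(rep)
--                     i = j + 2
--                     continue
--         out.append(filename[i])
--         i += 1
--     return ''.join(out)
-- ===== Notes on version B (the rewrite author's own statement) =====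
-- stated objective: alternative
-- what changed: Replaces A's ~30 sequential full-string str.replace passes by one left-to-right scan that, at each opening double-bracket, reads up to the next closing double-bracket and looks the bracketed token up in a precomputed reverse dict, and replaces the drive startswith/replace loop by a single length-11 slice lookup in a drive dict.
import Mathlib
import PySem

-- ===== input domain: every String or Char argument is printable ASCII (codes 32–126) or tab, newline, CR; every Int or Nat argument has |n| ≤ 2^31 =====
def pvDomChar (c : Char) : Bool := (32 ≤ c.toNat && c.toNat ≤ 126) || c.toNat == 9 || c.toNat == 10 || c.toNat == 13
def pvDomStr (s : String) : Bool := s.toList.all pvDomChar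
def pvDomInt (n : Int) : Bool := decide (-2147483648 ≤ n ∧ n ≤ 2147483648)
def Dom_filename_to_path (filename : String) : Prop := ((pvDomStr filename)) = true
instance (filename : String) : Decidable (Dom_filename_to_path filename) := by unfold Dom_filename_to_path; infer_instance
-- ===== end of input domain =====

-- B replaces A's ~30 cascaded str.replace passes by one bracket-driven scan with a
-- reverse-token dict, and the drive loop by a slice lookup; objective: alternative algorithm.

-- ===== PORT A =====
-- char_mapping.items() in Python dict (insertion) order, as (char, token) pairs
def pvCharPairs : List (Char × List Char) := [
  ('\\', "[[BACKSLASH]]".toList), ('/', "[[SLASH]]".toList), (':', "[[COLON]]".toList),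
  ('*', "[[ASTERISK]]".toList), ('?', "[[QUESTION]]".toList), ('"', "[[QUOTE]]".toList),
  ('<', "[[LESS]]".toList), ('>', "[[GREATER]]".toList), ('|', "[[PIPE]]".toList),
  (' ', "[[SPACE]]".toList), ('.', "[[DOT]]".toList), (',', "[[COMMA]]".toList),
  (';', "[[SEMICOLON]]".toList), ('=', "[[EQUAL]]".toList), ('(', "[[LPAREN]]".toList),
  (')', "[[RPAREN]]".toList), ('{', "[[LBRACE]]".toList), ('}', "[[RBRACE]]".toList),
  ('&', "[[AMPERSAND]]".toList), ('^', "[[CARET]]".toList), ('%', "[[PERCENT]]".toList),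
  ('$', "[[DOLLAR]]".toList), ('#', "[[HASH]]".toList), ('@', "[[AT]]".toList),
  ('!', "[[EXCLAMATION]]".toList), ('`', "[[BACKTICK]]".toList), ('~', "[[TILDE]]".toList),
  ('+', "[[PLUS]]".toList), ('\'', "[[SINGLEQUOTE]]".toList)]

-- drive_mapping.items() in order, as (drive, token) pairs
def pvDrivePairs : List (List Char × List Char) := [
  ("C:".toList, "[[DRIVE_C]]".toList), ("D:".toList, "[[DRIVE_D]]".toList),
  ("E:".toList, "[[DRIVE_E]]".toList), ("F:".toList, "[[DRIVE_F]]".toList)]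

def pvPathTok : List Char := "[[PATH]]".toList

-- exact hand port of str.replace(old, new, 1): replace the first occurrence only
def pvReplaceOnce (s old new : List Char) : List Char :=
  if old.isPrefixOf s then new ++ s.drop old.length
  else match s with
  | [] => []
  | c :: t => c :: pvReplaceOnce t old new

-- the drive loop of A: startswith guard, replace once, break
def pvDriveLoop : List (List Char × List Char) → List Char → List Char
  | [], s => s
  | (drive, repl) :: rest, s =>
    if PySem.Chars.startswith s repl then pvReplaceOnce s repl drive
    else pvDriveLoop rest s

def filename_to_path (filename : String) : String :=
  let s1 := pvDriveLoop pvDrivePairs filename.toList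
  let s2 := PySem.Chars.replace s1 pvPathTok ['\\']
  String.ofList (pvCharPairs.foldl (fun acc cp => PySem.Chars.replace acc cp.2 [cp.1]) s2)

-- ===== PORT B =====
-- _rev: token -> replacement string ({'[[PATH]]': '\\'} plus the inverted char_mapping)
def pvBTable : PySem.Dict (List Char) (List Char) := PySem.Dict.ofList [
  ("[[PATH]]".toList, ['\\']),
  ("[[BACKSLASH]]".toList, ['\\']), ("[[SLASH]]".toList, ['/']), ("[[COLON]]".toList, [':']),
  ("[[ASTERISK]]".toList, ['*']), ("[[QUESTION]]".toList, ['?']), ("[[QUOTE]]".toList, ['"']),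
  ("[[LESS]]".toList, ['<']), ("[[GREATER]]".toList, ['>']), ("[[PIPE]]".toList, ['|']),
  ("[[SPACE]]".toList, [' ']), ("[[DOT]]".toList, ['.']), ("[[COMMA]]".toList, [',']),
  ("[[SEMICOLON]]".toList, [';']), ("[[EQUAL]]".toList, ['=']), ("[[LPAREN]]".toList, ['(']),
  ("[[RPAREN]]".toList, [')']), ("[[LBRACE]]".toList, ['{']), ("[[RBRACE]]".toList, ['}']),
  ("[[AMPERSAND]]".toList, ['&']), ("[[CARET]]".toList, ['^']), ("[[PERCENT]]".toList, ['%']),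
  ("[[DOLLAR]]".toList, ['$']), ("[[HASH]]".toList, ['#']), ("[[AT]]".toList, ['@']),
  ("[[EXCLAMATION]]".toList, ['!']), ("[[BACKTICK]]".toList, ['`']), ("[[TILDE]]".toList, ['~']),
  ("[[PLUS]]".toList, ['+']), ("[[SINGLEQUOTE]]".toList, ['\''])]

-- _drive_rev: drive token (length 11) -> drive prefix
def pvBDriveTable : PySem.Dict (List Char) (List Char) := PySem.Dict.ofList [
  ("[[DRIVE_C]]".toList, "C:".toList), ("[[DRIVE_D]]".toList, "D:".toList),
  ("[[DRIVE_E]]".toList, "E:".toList), ("[[DRIVE_F]]".toList, "F:".toList)]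

-- filename.find(']]', i), as an offset into the suffix starting at i
def pvBFind : List Char → Option Nat
  | [] => none
  | [_] => none
  | a :: b :: t => if a = ']' ∧ b = ']' then some 0 else (pvBFind (b :: t)).map (· + 1)

-- the while loop of Source B over the remaining suffix: at '[[' read up to the next ']]'
-- and look the bracketed token up; otherwise emit one character
def pvBLoop : List Char → List Char
  | [] => []
  | a :: t =>
    if a = '[' ∧ t.take 1 = ['['] then
      match pvBFind (a :: t) with
      | some j =>
        match pvBTable.get? ((a :: t).take (j + 2)) with
        | some r => r ++ pvBLoop ((a :: t).drop (j + 2))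
        | none => a :: pvBLoop t
      | none => a :: pvBLoop t
    else a :: pvBLoop t
termination_by s => s.length
decreasing_by
  all_goals simp only [List.length_drop, List.length_cons]
  all_goals omega

def filename_to_path_alt (filename : String) : String :=
  let s := filename.toList
  let s1 := match pvBDriveTable.get? (s.take 11) with
    | some d => d ++ s.drop 11
    | none => s
  String.ofList (pvBLoop s1)

-- ===== PRECONDITION & SPEC =====
def Spec_filename_to_path (filename : String) (out : String) : Prop := out = filename_to_path_alt filename
instance (filename : String) (out : String) : Decidable (Spec_filename_to_path filename out) := by unfold Spec_filename_to_path; infer_instance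

-- ===== CLAIM (what is proved, stated in full; the proofs are below) =====
def Claim_equal_filename_to_path : Prop := ∀ (filename : String), Dom_filename_to_path filename → Spec_filename_to_path filename (filename_to_path filename)

-- ===== LEMMAS AND PROOFS =====

-- proof-side: the reverse map as an ordered (token, char) list, and the generic
-- leftmost-token scan both ports are reduced to
def pvRevMap : List (List Char × Char) := pvBTable.items.map (fun q => (q.1, q.2.headD ' '))

def pvAgrees (t x : List Char) : Bool := (t.take x.length).isPrefixOf x

def pvMatchAt (P : List (List Char × Char)) (s : List Char) : Option (List Char × Char) :=
  match P with
  | [] => none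
  | (tok, c) :: rest => if tok.isPrefixOf s then some (tok, c) else pvMatchAt rest s

def pvScan (P : List (List Char × Char)) (s : List Char) : List Char :=
  match s with
  | [] => []
  | c :: t =>
    match pvMatchAt P (c :: t) with
    | some (tok, r) => r :: pvScan P (t.drop (tok.length - 1))
    | none => c :: pvScan P t
termination_by s.length
decreasing_by
  · simp only [List.length_drop, List.length_cons]; omega
  · simp

lemma pvAgrees_of_prefix_append {t x z : List Char} (h : t.isPrefixOf (x ++ z) = true) :
    pvAgrees t x = true := by
  simp only [pvAgrees, List.isPrefixOf_iff_prefix] at *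
  have := List.IsPrefix.take h x.length
  rwa [List.take_left] at this

lemma pvNotPrefix_append {t x : List Char} (h : pvAgrees t x = false) (z : List Char) :
    t.isPrefixOf (x ++ z) = false := by
  by_contra hc
  rw [Bool.not_eq_false] at hc
  rw [pvAgrees_of_prefix_append hc] at h
  exact Bool.true_eq_false.mp h

lemma pvMatchAt_none_iff {P : List (List Char × Char)} {s : List Char} :
    pvMatchAt P s = none ↔ ∀ q ∈ P, q.1.isPrefixOf s = false := by
  induction P with
  | nil => simp [pvMatchAt]
  | cons q rest ih =>
    obtain ⟨tok, c⟩ := q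
    simp only [pvMatchAt]
    split_ifs with hp
    · simp [hp]
    · rw [ih]
      constructor
      · intro hall q hq
        rcases List.mem_cons.mp hq with rfl | hq'
        · rw [Bool.eq_false_iff]
          simpa [List.isPrefixOf_iff_prefix] using hp
        · exact hall q hq'
      · intro hall q hq
        exact hall q (List.mem_cons_of_mem _ hq)

lemma pvMatchAt_some {P : List (List Char × Char)} {s : List Char} {tok : List Char} {c : Char}
    (h : pvMatchAt P s = some (tok, c)) : (tok, c) ∈ P ∧ tok.isPrefixOf s = true := by
  induction P with
  | nil => simp [pvMatchAt] at h
  | cons q rest ih =>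
    obtain ⟨tq, cq⟩ := q
    simp only [pvMatchAt] at h
    split_ifs at h with hp
    · obtain ⟨rfl, rfl⟩ : tq = tok ∧ cq = c := by
        constructor <;> [skip; skip] <;> injection h with h'; · exact (Prod.mk.injEq .. ▸ h').1
        · exact (Prod.mk.injEq .. ▸ h').2
      exact ⟨List.mem_cons_self .., hp⟩
    · have := ih h
      exact ⟨List.mem_cons_of_mem _ this.1, this.2⟩

lemma pvMatchAt_congr {P : List (List Char × Char)} {tok : List Char} {c : Char} {r u : List Char}
    (hpw : P.Pairwise (fun a b => pvAgrees a.1 b.1 = false))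
    (h : pvMatchAt P (tok ++ r) = some (tok, c)) :
    pvMatchAt P (tok ++ u) = some (tok, c) := by
  induction P with
  | nil => simp [pvMatchAt] at h
  | cons q rest ih =>
    obtain ⟨tq, cq⟩ := q
    rw [List.pairwise_cons] at hpw
    simp only [pvMatchAt] at h ⊢
    split_ifs at h with hp
    · obtain ⟨rfl, rfl⟩ : tq = tok ∧ cq = c := by
        refine ⟨?_, ?_⟩ <;> injection h with h'
        · exact (Prod.mk.injEq .. ▸ h').1
        · exact (Prod.mk.injEq .. ▸ h').2
      rw [if_pos (by simp [List.isPrefixOf_iff_prefix])]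
    · have hm := pvMatchAt_some h
      have hag : pvAgrees tq tok = false := hpw.1 (tok, c) hm.1
      rw [if_neg (by simp [pvNotPrefix_append hag])]
      exact ih hpw.2 h

lemma pvScan_nil_tokens (s : List Char) : pvScan [] s = s := by
  induction s with
  | nil => simp [pvScan]
  | cons c t ih => rw [pvScan]; simp only [pvMatchAt]; rw [ih]

lemma pvScan_no_create {t1 : List Char} {c1 : Char} {w v : List Char} (hw : c1 ∉ w)
    (h : w.isPrefixOf (pvScan [(t1, c1)] v) = true) : w.isPrefixOf v = true := by
  induction v generalizing w with
  | nil =>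
    rw [pvScan] at h
    cases w with
    | nil => simp
    | cons b w' => simp [List.isPrefixOf] at h
  | cons a v' ih =>
    rw [pvScan] at h
    by_cases hps : t1.isPrefixOf (a :: v') = true
    · simp only [pvMatchAt, hps, if_pos] at h
      cases w with
      | nil => simp
      | cons b w' =>
        simp only [List.isPrefixOf, Bool.and_eq_true, beq_iff_eq] at h
        exact absurd (show c1 ∈ b :: w' by rw [h.1]; exact List.mem_cons_self ..) hw
    · simp only [pvMatchAt, if_neg hps] at h
      cases w with
      | nil => simp
      | cons b w' =>
        simp only [List.isPrefixOf, Bool.and_eq_true, beq_iff_eq] at h ⊢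
        exact ⟨h.1, ih (fun hc => hw (List.mem_cons_of_mem _ hc)) h.2⟩

lemma pvScan_skip {t1 : List Char} {c1 : Char} {x : List Char}
    (hx : ∀ j < x.length, pvAgrees t1 (List.drop j x) = false) (r : List Char) :
    pvScan [(t1, c1)] (x ++ r) = x ++ pvScan [(t1, c1)] r := by
  induction x with
  | nil => simp
  | cons a x' ih =>
    have h0 : t1.isPrefixOf (a :: (x' ++ r)) = false := by
      have := hx 0 (by simp)
      simpa using pvNotPrefix_append this r
    rw [List.cons_append, pvScan]
    simp only [pvMatchAt, h0, if_neg Bool.false_ne_true]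
    rw [ih (fun j hj => by simpa using hx (j + 1) (by simpa using hj))]
    simp

lemma pvGo_spec {old : List Char} (c : Char) (h : old ≠ []) :
    ∀ (fuel : Nat) (l acc : List Char), l.length ≤ fuel →
      PySem.Chars.replace.go old [c] fuel l acc = acc.reverse ++ pvScan [(old, c)] l := by
  intro fuel
  induction fuel with
  | zero =>
    intro l acc hl
    have : l = [] := by cases l <;> simp_all
    subst this
    rw [PySem.Chars.replace.go, pvScan]
  | succ n ih =>
    intro l acc hl
    cases l with
    | nil =>
      rw [PySem.Chars.replace.go, pvScan]
      · simp
      · omega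
    | cons a t =>
      rw [PySem.Chars.replace.go]
      by_cases hp : old.isPrefixOf (a :: t) = true
      · rw [if_pos hp]
        have hlen : (List.drop old.length (a :: t)).length ≤ n := by
          have : 1 ≤ old.length := by cases old <;> simp_all
          simp only [List.length_drop, List.length_cons] at *
          omega
        rw [ih _ _ hlen]
        rw [pvScan]
        simp only [pvMatchAt, hp, if_pos]
        have hdrop : List.drop old.length (a :: t) = List.drop (old.length - 1) t := by
          cases old with
          | nil => simp_all
          | cons b o' => simp
        rw [hdrop]
        simp
      · rw [if_neg hp]
        rw [ih _ _ (by simpa using Nat.le_of_succ_le_succ (by simpa using hl))]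
        rw [pvScan]
        simp only [pvMatchAt, if_neg hp]
        simp

lemma pvReplace_eq_scan {old : List Char} (c : Char) (h : old ≠ []) (s : List Char) :
    PySem.Chars.replace s old [c] = pvScan [(old, c)] s := by
  rw [PySem.Chars.replace]
  rw [if_neg (by simp [List.isEmpty_iff, h])]
  simpa using pvGo_spec c h s.length s [] le_rfl

lemma pvStep (t1 : List Char) (c1 : Char) (P' : List (List Char × Char))
    (H1 : ∀ q ∈ (t1, c1) :: P', q.1 ≠ [])
    (H2 : ∀ q ∈ (t1, c1) :: P', ∀ q2 ∈ (t1, c1) :: P', q.2 ∉ q2.1)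
    (H3 : ((t1, c1) :: P').Pairwise (fun a b => pvAgrees a.1 b.1 = false ∧ pvAgrees b.1 a.1 = false))
    (H4 : ∀ q ∈ (t1, c1) :: P', ∀ q2 ∈ (t1, c1) :: P', ∀ j, 1 ≤ j → j < q2.1.length →
      pvAgrees q.1 (q2.1.drop j) = false) :
    ∀ s, pvScan P' (pvScan [(t1, c1)] s) = pvScan ((t1, c1) :: P') s := by
  have main : ∀ (n : Nat) (s : List Char), s.length ≤ n →
      pvScan P' (pvScan [(t1, c1)] s) = pvScan ((t1, c1) :: P') s := by
    intro n
    induction n with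
    | zero =>
      intro s hs
      have : s = [] := by cases s <;> simp_all
      subst this
      simp [pvScan]
    | succ n ih =>
      intro s hs
      cases s with
      | nil => simp [pvScan]
      | cons a t =>
        by_cases h1 : t1.isPrefixOf (a :: t) = true
        · -- the first token matches here
          obtain ⟨r, hr⟩ : ∃ r, t1 ++ r = a :: t := List.isPrefixOf_iff_prefix.mp h1
          cases t1 with
          | nil => exact absurd rfl (H1 (([], c1)) (List.mem_cons_self ..))
          | cons b t1' =>
            have hb : b = a := by simpa using congrArg (fun l => l.headD 'x') hr
            subst hb
            have ht : t = t1' ++ r := by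
              have := hr; simp only [List.cons_append, List.cons.injEq] at this
              exact this.2.symm
            have hdrop : List.drop ((b :: t1').length - 1) t = r := by
              rw [ht]; simp
            have hrlen : r.length ≤ n := by
              rw [ht] at hs; simp at hs; omega
            rw [pvScan]
            simp only [pvMatchAt, h1, if_pos, hdrop]
            have hnone : pvMatchAt P' (c1 :: pvScan [(b :: t1', c1)] r) = none := by
              rw [pvMatchAt_none_iff]
              intro q hq
              cases hq1 : q.1 with
              | nil => exact absurd hq1 (H1 q (List.mem_cons_of_mem _ hq))
              | cons d w =>
                have hd : d ≠ c1 := by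
                  intro hdc
                  exact H2 ((b :: t1', c1)) (List.mem_cons_self ..) q (List.mem_cons_of_mem _ hq)
                    (by rw [hq1, hdc]; exact List.mem_cons_self ..)
                simp [List.isPrefixOf, hd]
            rw [pvScan]
            simp only [hnone]
            rw [ih r hrlen]
            rw [pvScan]
            simp only [pvMatchAt, h1, if_pos, hdrop]
        · by_cases hm : (pvMatchAt P' (a :: t)).isSome
          · -- some later token matches here
            obtain ⟨⟨tok', c'⟩, hm'⟩ : ∃ q, pvMatchAt P' (a :: t) = some q :=
              Option.isSome_iff_exists.mp hm
            obtain ⟨hmem, hpre⟩ := pvMatchAt_some hm'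
            obtain ⟨r, hr⟩ : ∃ r, tok' ++ r = a :: t := List.isPrefixOf_iff_prefix.mp hpre
            have hx : ∀ j < tok'.length, pvAgrees t1 (List.drop j tok') = false := by
              intro j hj
              cases j with
              | zero =>
                have := (List.pairwise_cons.mp H3).1 (tok', c') hmem
                simpa using this.1
              | succ j' =>
                exact H4 ((t1, c1)) (List.mem_cons_self ..) ((tok', c')) (List.mem_cons_of_mem _ hmem)
                  (j' + 1) (by omega) hj
            have hskip : pvScan [(t1, c1)] (a :: t) = tok' ++ pvScan [(t1, c1)] r := by
              rw [← hr]; exact pvScan_skip hx r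
            have hpw' : P'.Pairwise (fun q q2 => pvAgrees q.1 q2.1 = false) :=
              ((List.pairwise_cons.mp H3).2).imp (fun hh => hh.1)
            have hcongr : pvMatchAt P' (tok' ++ pvScan [(t1, c1)] r) = some (tok', c') := by
              apply pvMatchAt_congr hpw'
              rw [hr]; exact hm'
            cases htok : tok' with
            | nil => exact absurd htok (H1 ((tok', c')) (List.mem_cons_of_mem _ hmem))
            | cons e tok'' =>
              subst htok
              have ht : t = tok'' ++ r := by
                have : e = a := by simpa using congrArg (fun l => l.headD 'x') hr
                subst this
                simp only [List.cons_append, List.cons.injEq] at hr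
                exact hr.2.symm
              have hrlen : r.length ≤ n := by
                rw [ht] at hs; simp at hs; omega
              rw [hskip]
              rw [List.cons_append, pvScan]
              rw [List.cons_append] at hcongr
              simp only [hcongr]
              have hdrop2 : List.drop ((e :: tok'').length - 1) (tok'' ++ pvScan [(t1, c1)] r)
                  = pvScan [(t1, c1)] r := by simp
              rw [hdrop2, ih r hrlen]
              rw [pvScan]
              simp only [pvMatchAt, if_neg h1, hm']
              rw [ht]
              simp
          · -- no token matches here
            have hmn : pvMatchAt P' (a :: t) = none := by
              cases hq : pvMatchAt P' (a :: t)
              · rfl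
              · rw [hq] at hm; simp at hm
            have h1' : ¬ (t1 <+: a :: t) := by
              rw [← List.isPrefixOf_iff_prefix]; simpa using h1
            have hsingle : pvScan [(t1, c1)] (a :: t) = a :: pvScan [(t1, c1)] t := by
              rw [pvScan]; simp [pvMatchAt, h1']
            rw [hsingle]
            have hnone2 : pvMatchAt P' (a :: pvScan [(t1, c1)] t) = none := by
              rw [pvMatchAt_none_iff]
              intro q hq
              by_contra hc
              rw [Bool.not_eq_false] at hc
              rw [← hsingle] at hc
              have := pvScan_no_create
                (H2 ((t1, c1)) (List.mem_cons_self ..) q (List.mem_cons_of_mem _ hq)) hc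
              have hfalse := pvMatchAt_none_iff.mp hmn q hq
              rw [this] at hfalse
              exact Bool.true_eq_false.mp hfalse
            rw [pvScan]
            simp only [hnone2]
            rw [ih t (by simpa using Nat.le_of_succ_le_succ (by simpa using hs))]
            rw [pvScan]
            simp only [pvMatchAt, if_neg h1, hmn]
  exact fun s => main s.length s le_rfl

lemma pvCascade (P : List (List Char × Char))
    (H1 : ∀ q ∈ P, q.1 ≠ [])
    (H2 : ∀ q ∈ P, ∀ q2 ∈ P, q.2 ∉ q2.1)
    (H3 : P.Pairwise (fun a b => pvAgrees a.1 b.1 = false ∧ pvAgrees b.1 a.1 = false))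
    (H4 : ∀ q ∈ P, ∀ q2 ∈ P, ∀ j, 1 ≤ j → j < q2.1.length → pvAgrees q.1 (List.drop j q2.1) = false)
    (s : List Char) :
    P.foldl (fun acc q => pvScan [q] acc) s = pvScan P s := by
  induction P generalizing s with
  | nil => simpa using (pvScan_nil_tokens s).symm
  | cons q P' ih =>
    obtain ⟨t1, c1⟩ := q
    rw [List.foldl_cons]
    rw [ih
      (fun q hq => H1 q (List.mem_cons_of_mem _ hq))
      (fun q hq q2 hq2 => H2 q (List.mem_cons_of_mem _ hq) q2 (List.mem_cons_of_mem _ hq2))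
      (List.Pairwise.of_cons H3)
      (fun q hq q2 hq2 => H4 q (List.mem_cons_of_mem _ hq) q2 (List.mem_cons_of_mem _ hq2))]
    exact pvStep t1 c1 P' H1 H2 H3 H4 s

set_option maxHeartbeats 2000000 in
lemma pvH1 : ∀ q ∈ pvRevMap, q.1 ≠ [] := by decide

set_option maxHeartbeats 2000000 in
lemma pvH2 : ∀ q ∈ pvRevMap, ∀ q2 ∈ pvRevMap, q.2 ∉ q2.1 := by decide

set_option maxHeartbeats 4000000 in
lemma pvH3 : pvRevMap.Pairwise (fun a b => pvAgrees a.1 b.1 = false ∧ pvAgrees b.1 a.1 = false) := by decide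

set_option maxHeartbeats 8000000 in
lemma pvH4 : ∀ q ∈ pvRevMap, ∀ q2 ∈ pvRevMap, ∀ j, 1 ≤ j → j < q2.1.length →
    pvAgrees q.1 (List.drop j q2.1) = false := by decide

set_option maxHeartbeats 2000000 in
lemma pvRevMap_lit : pvRevMap = (pvPathTok, '\\') :: pvCharPairs.map (fun cp => (cp.2, cp.1)) := by decide

lemma pvFold_conv (L : List (Char × List Char)) (hL : ∀ cp ∈ L, cp.2 ≠ []) :
    ∀ s, L.foldl (fun acc cp => PySem.Chars.replace acc cp.2 [cp.1]) s
       = L.foldl (fun acc cp => pvScan [(cp.2, cp.1)] acc) s := by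
  induction L with
  | nil => intro s; rfl
  | cons cp L' ih =>
    intro s
    rw [List.foldl_cons, List.foldl_cons,
      pvReplace_eq_scan cp.1 (hL cp (List.mem_cons_self ..)) s]
    exact ih (fun q hq => hL q (List.mem_cons_of_mem _ hq)) _

-- A's cascaded replaces equal one pvRevMap scan
lemma pvChars_eq (d : List Char) :
    pvCharPairs.foldl (fun acc cp => PySem.Chars.replace acc cp.2 [cp.1])
      (PySem.Chars.replace d pvPathTok ['\\'])
    = pvScan pvRevMap d := by
  rw [pvReplace_eq_scan '\\' (by decide) d]
  rw [pvFold_conv pvCharPairs (by decide)]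
  rw [← pvCascade pvRevMap pvH1 pvH2 pvH3 pvH4 d]
  rw [pvRevMap_lit, List.foldl_cons, List.foldl_map]

-- ===== B-side lemmas =====

lemma pvBFind_append {tok : List Char} {k : Nat} (r : List Char)
    (h : pvBFind tok = some k) : pvBFind (tok ++ r) = some k := by
  induction tok generalizing k with
  | nil => simp [pvBFind] at h
  | cons a t ih =>
    cases t with
    | nil => simp [pvBFind] at h
    | cons b t2 =>
      rw [pvBFind] at h
      rw [List.cons_append, List.cons_append, pvBFind]
      split_ifs at h with hbr
      · rw [if_pos hbr]; exact h
      · rw [if_neg hbr]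
        obtain ⟨k', hk', rfl⟩ : ∃ k', pvBFind (b :: t2) = some k' ∧ k = k' + 1 := by
          cases hh : pvBFind (b :: t2) with
          | none => rw [hh] at h; simp at h
          | some k' => rw [hh] at h; simp at h; exact ⟨k', rfl, h.symm⟩
        have hstep := ih hk'
        rw [List.cons_append] at hstep
        rw [hstep]
        rfl

-- facts about every reverse-map entry, checked by computation
set_option maxHeartbeats 4000000 in
lemma pvKeyFacts : ∀ q ∈ pvRevMap, q.1.take 2 = ['[', '['] ∧ 2 ≤ q.1.length ∧
    pvBFind q.1 = some (q.1.length - 2) ∧ pvBTable.get? q.1 = some [q.2] := by decide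

lemma pvRevMap_of_get? {k v : List Char} (h : pvBTable.get? k = some v) :
    (k, v.headD ' ') ∈ pvRevMap := by
  have := PySem.Dict.mem_items_of_get?_eq_some _ h
  exact List.mem_map.mpr ⟨(k, v), this, rfl⟩

-- B's scan equals the generic pvRevMap scan
lemma pvBLoop_eq_scan : ∀ s : List Char, pvBLoop s = pvScan pvRevMap s := by
  have main : ∀ (n : Nat) (s : List Char), s.length ≤ n → pvBLoop s = pvScan pvRevMap s := by
    intro n
    induction n with
    | zero =>
      intro s hs
      have : s = [] := by cases s <;> simp_all
      subst this
      simp only [pvBLoop, pvScan]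
    | succ n ih =>
      intro s hs
      cases s with
      | nil => simp only [pvBLoop, pvScan]
      | cons a t =>
        cases hm : pvMatchAt pvRevMap (a :: t) with
        | some q =>
          obtain ⟨tok, c⟩ := q
          obtain ⟨hmem, hpre⟩ := pvMatchAt_some hm
          obtain ⟨htake2, hlen2, hfind, hget⟩ := pvKeyFacts (tok, c) hmem
          dsimp only at htake2 hlen2 hfind hget
          obtain ⟨r, hr⟩ : ∃ r, tok ++ r = a :: t := List.isPrefixOf_iff_prefix.mp hpre
          have hg : a = '[' ∧ t.take 1 = ['['] := by
            have h2 : (a :: t).take 2 = ['[', '['] := by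
              rw [← hr, List.take_append_of_le_length hlen2, htake2]
            simp only [List.take_succ_cons] at h2
            have hinj := List.cons.inj h2
            exact ⟨hinj.1, hinj.2⟩
          have hfs : pvBFind (a :: t) = some (tok.length - 2) := by
            rw [← hr]; exact pvBFind_append r hfind
          have hplus : tok.length - 2 + 2 = tok.length := by omega
          have htk : (a :: t).take (tok.length - 2 + 2) = tok := by
            rw [hplus, ← hr, List.take_left]
          have hdr : (a :: t).drop (tok.length - 2 + 2) = r := by
            rw [hplus, ← hr, List.drop_left]
          have hrlen : r.length ≤ n := by
            have hlen3 : (a :: t).length = tok.length + r.length := by rw [← hr]; simp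
            simp only [List.length_cons] at hs hlen3
            omega
          simp only [pvBLoop]
          rw [if_pos hg, hfs]
          simp only
          rw [htk, hget]
          simp only
          rw [hdr, ih r hrlen]
          rw [pvScan]
          simp only [hm]
          have hdr2 : t.drop (tok.length - 1) = r := by
            cases tok with
            | nil => simp at hlen2
            | cons e tok' =>
              have ht2 : t = tok' ++ r := by
                simp only [List.cons_append, List.cons.injEq] at hr
                exact hr.2.symm
              rw [ht2]
              simp
          rw [hdr2]
          simp
        | none =>
          have htail : pvBLoop t = pvScan pvRevMap t :=
            ih t (by simpa using Nat.le_of_succ_le_succ (by simpa using hs))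
          have hres : pvScan pvRevMap (a :: t) = a :: pvScan pvRevMap t := by
            rw [pvScan]; simp only [hm]
          rw [hres, ← htail]
          simp only [pvBLoop]
          by_cases hg : a = '[' ∧ t.take 1 = ['[']
          · rw [if_pos hg]
            cases hf : pvBFind (a :: t) with
            | none => simp only
            | some j =>
              simp only
              cases hget : pvBTable.get? ((a :: t).take (j + 2)) with
              | none => simp only
              | some v =>
                exfalso
                have hmemrm := pvRevMap_of_get? hget
                have hfalse := pvMatchAt_none_iff.mp hm _ hmemrm
                have hprefix : ((a :: t).take (j + 2)).isPrefixOf (a :: t) = true := by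
                  rw [List.isPrefixOf_iff_prefix]
                  exact List.take_prefix _ _
                rw [hfalse] at hprefix
                exact Bool.false_ne_true hprefix
          · rw [if_neg hg]
  exact fun s => main s.length s le_rfl

-- A's drive loop equals B's slice lookup (all drive tokens have length 11)
lemma pvDrive_eq (s : List Char) :
    pvDriveLoop pvDrivePairs s =
      (match pvBDriveTable.get? (s.take 11) with
       | some d => d ++ s.drop 11
       | none => s) := by
  have hcase : ∀ (tok drv : List Char), tok.length = 11 →
      tok.isPrefixOf s = true → pvBDriveTable.get? tok = some drv →
      pvReplaceOnce s tok drv =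
        (match pvBDriveTable.get? (s.take 11) with
         | some d => d ++ s.drop 11 | none => s) := by
    intro tok drv hlen hpre hget
    have htk : s.take 11 = tok := by
      obtain ⟨r, hr⟩ := List.isPrefixOf_iff_prefix.mp hpre
      rw [← hr, ← hlen, List.take_left]
    rw [htk, hget]
    rw [pvReplaceOnce.eq_def, if_pos hpre, hlen]
  by_cases hC : "[[DRIVE_C]]".toList.isPrefixOf s = true
  · simp only [pvDrivePairs, pvDriveLoop, PySem.Chars.startswith, hC, if_true]
    exact hcase _ _ (by decide) hC (by decide)
  · rw [Bool.not_eq_true] at hC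
    by_cases hD : "[[DRIVE_D]]".toList.isPrefixOf s = true
    · simp only [pvDrivePairs, pvDriveLoop, PySem.Chars.startswith, hC, hD,
        Bool.false_eq_true, if_false, if_true]
      exact hcase _ _ (by decide) hD (by decide)
    · rw [Bool.not_eq_true] at hD
      by_cases hE : "[[DRIVE_E]]".toList.isPrefixOf s = true
      · simp only [pvDrivePairs, pvDriveLoop, PySem.Chars.startswith, hC, hD, hE,
          Bool.false_eq_true, if_false, if_true]
        exact hcase _ _ (by decide) hE (by decide)
      · rw [Bool.not_eq_true] at hE
        by_cases hF : "[[DRIVE_F]]".toList.isPrefixOf s = true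
        · simp only [pvDrivePairs, pvDriveLoop, PySem.Chars.startswith, hC, hD, hE, hF,
            Bool.false_eq_true, if_false, if_true]
          exact hcase _ _ (by decide) hF (by decide)
        · rw [Bool.not_eq_true] at hF
          simp only [pvDrivePairs, pvDriveLoop, PySem.Chars.startswith, hC, hD, hE, hF,
            Bool.false_eq_true, if_false]
          cases hg : pvBDriveTable.get? (s.take 11) with
          | none => rfl
          | some d =>
            exfalso
            have hmi := PySem.Dict.mem_items_of_get?_eq_some _ hg
            have htp : ∀ tok : List Char, s.take 11 = tok → tok.isPrefixOf s = true := by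
              intro tok htk
              rw [List.isPrefixOf_iff_prefix, ← htk]
              exact List.take_prefix _ _
            have hitems : pvBDriveTable.items = [
              ("[[DRIVE_C]]".toList, "C:".toList), ("[[DRIVE_D]]".toList, "D:".toList),
              ("[[DRIVE_E]]".toList, "E:".toList), ("[[DRIVE_F]]".toList, "F:".toList)] := by decide
            rw [hitems] at hmi
            simp only [List.mem_cons, List.not_mem_nil, or_false, Prod.mk.injEq] at hmi
            rcases hmi with ⟨h1, _⟩ | ⟨h1, _⟩ | ⟨h1, _⟩ | ⟨h1, _⟩
            · rw [htp _ h1] at hC; exact Bool.true_eq_false.mp hC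
            · rw [htp _ h1] at hD; exact Bool.true_eq_false.mp hD
            · rw [htp _ h1] at hE; exact Bool.true_eq_false.mp hE
            · rw [htp _ h1] at hF; exact Bool.true_eq_false.mp hF

-- ===== VERDICT (by name: the statement is the Claim_ definition above) =====
theorem filename_to_path_spec : Claim_equal_filename_to_path := by
  intro filename _
  unfold Spec_filename_to_path
  simp only [filename_to_path, filename_to_path_alt]
  rw [pvChars_eq, pvDrive_eq, pvBLoop_eq_scan]
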